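-- pv_equiv track=rewrite | github.com/Deepak-620/AIPP-ASSI | Assignment-6/Task3.py | classify_age_dictionary
-- ===== SOURCE A (Python) =====
-- def classify_age_dictionary(age):
--     age_ranges = {
--         (0, 12): "Child",
--         (13, 17): "Teen",
--         (18, 64): "Adult",
--         (65, 200): "Senior"
--     }
--
--     if age < 0:
--         return "Invalid Age"
--
--     for (min_age, max_age), category in age_ranges.items():
--         if min_age <= age <= max_age:
--             return category
--     return "Invalid Age"
-- ===== SOURCE B (Python) =====
-- def classify_age_dictionary(age):
--     # Valid ages are 0..200; within that, the category index is just the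
--     # number of upper boundaries (12, 17, 64) the age has passed.
--     if age < 0 or age > 200:
--         return "Invalid Age"
--     idx = sum(age > t for t in (12, 17, 64))
--     return ("Child", "Teen", "Adult", "Senior")[idx]
-- ===== Notes on version B (the rewrite author's own statement) =====
-- stated objective: alternative
-- what changed: Replaced the range-tuple dictionary and its item-scanning loop with arithmetic indexing: count how many upper boundaries (12, 17, 64) the age exceeds and use that count as an index into a fixed category tuple, after one combined 0..200 validity guard.
import Mathlib
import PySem

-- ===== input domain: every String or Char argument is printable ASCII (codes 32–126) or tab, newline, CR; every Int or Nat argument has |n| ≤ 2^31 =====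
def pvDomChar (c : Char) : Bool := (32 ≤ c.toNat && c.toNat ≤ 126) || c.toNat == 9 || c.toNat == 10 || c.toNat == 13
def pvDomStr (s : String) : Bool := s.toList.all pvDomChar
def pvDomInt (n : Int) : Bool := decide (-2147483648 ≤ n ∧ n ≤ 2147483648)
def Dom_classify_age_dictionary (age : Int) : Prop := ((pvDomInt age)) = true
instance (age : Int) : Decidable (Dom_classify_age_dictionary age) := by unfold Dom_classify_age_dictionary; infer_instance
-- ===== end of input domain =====

-- B replaces A's range-tuple dictionary scan with arithmetic indexing: count passed boundaries, index a fixed table (alternative).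

-- ===== PORT A =====
-- A builds a dict keyed by (min,max) pairs and scans its items in insertion order.
def pvAgeRanges : PySem.Dict (Int × Int) String :=
  ((PySem.Dict.empty.insert (0, 12) "Child").insert (13, 17) "Teen"
    |>.insert (18, 64) "Adult" |>.insert (65, 200) "Senior")

-- the for-loop with early return, over the dict's item list
def pvScan (age : Int) : List ((Int × Int) × String) → String
  | [] => "Invalid Age"
  | ((mn, mx), cat) :: rest =>
      if mn ≤ age ∧ age ≤ mx then cat else pvScan age rest

def classify_age_dictionary (age : Int) : String :=
  if age < 0 then "Invalid Age"
  else pvScan age pvAgeRanges.items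

-- ===== PORT B =====
-- sum(age > t for t in (12, 17, 64)) = number of thresholds the age exceeds
def classify_age_dictionary_alt (age : Int) : String :=
  if age < 0 ∨ age > 200 then "Invalid Age"
  else
    let idx := ([(12 : Int), 17, 64].countP (fun t => age > t))
    (["Child", "Teen", "Adult", "Senior"].getD idx "Invalid Age")

-- ===== PRECONDITION & SPEC =====
def Spec_classify_age_dictionary (age : Int) (out : String) : Prop := out = classify_age_dictionary_alt age
instance (age : Int) (out : String) : Decidable (Spec_classify_age_dictionary age out) := by unfold Spec_classify_age_dictionary; infer_instance

-- ===== CLAIM (what is proved, stated in full; the proofs are below) =====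
def Claim_equal_classify_age_dictionary : Prop := ∀ (age : Int), Dom_classify_age_dictionary age → Spec_classify_age_dictionary age (classify_age_dictionary age)

-- ===== LEMMAS AND PROOFS =====
theorem pvAgeRanges_items :
    pvAgeRanges.items = [((0, 12), "Child"), ((13, 17), "Teen"), ((18, 64), "Adult"), ((65, 200), "Senior")] := by
  decide

-- ===== VERDICT (by name: the statement is the Claim_ definition above) =====
theorem classify_age_dictionary_spec : Claim_equal_classify_age_dictionary := by
  intro age _
  unfold Spec_classify_age_dictionary classify_age_dictionary classify_age_dictionary_alt
  rw [pvAgeRanges_items]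
  simp only [pvScan, List.countP, List.countP.go, gt_iff_lt]
  by_cases h0 : age < 0
  · simp [h0]
  by_cases h12 : age ≤ 12
  · simp [h0, h12, show 0 ≤ age from by omega, show ¬(12 < age) from by omega,
      show ¬(17 < age) from by omega, show ¬(64 < age) from by omega, show ¬(200 < age) from by omega]
  by_cases h17 : age ≤ 17
  · simp [h0, h12, h17, show 13 ≤ age from by omega, show (12 : Int) < age from by omega,
      show ¬(17 < age) from by omega, show ¬(64 < age) from by omega, show ¬(200 < age) from by omega]
  by_cases h64 : age ≤ 64
  · simp [h0, h12, h17, h64, show 18 ≤ age from by omega, show (12 : Int) < age from by omega,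
      show (17 : Int) < age from by omega, show ¬(64 < age) from by omega, show ¬(200 < age) from by omega]
  by_cases h200 : age ≤ 200
  · simp [h0, h12, h17, h64, h200, show 65 ≤ age from by omega, show (12 : Int) < age from by omega,
      show (17 : Int) < age from by omega, show (64 : Int) < age from by omega, show ¬(200 < age) from by omega]
  · simp [h0, h12, h17, h64, h200, show (200 : Int) < age from by omega]
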